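-- pv_equiv track=rewrite | github.com/nelu/herominer | app/game/guild/adventures.py | get_preferred
-- ===== SOURCE A (Python) =====
-- def get_preferred(entries, preferred_ids, asc=True):
--     # Step 1: Add preferred levels first (with ID and name)
--     seen = set()
--     ordered = {}
--
--     for lvl_id in preferred_ids:
--         if lvl_id in entries and lvl_id not in seen:
--             ordered[lvl_id] = entries[lvl_id]
--             seen.add(lvl_id)
--
--     # Step 2: Add the rest, sorted by level ID
--     for lvl_id in sorted(entries.keys(), key=lambda x: int(x)):
--         if lvl_id not in seen:
--             ordered[lvl_id] = entries[lvl_id]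
--             seen.add(lvl_id)
--
--     return ordered
-- ===== SOURCE B (Python) =====
-- def get_preferred(entries, preferred_ids, asc=True):
--     # One composite stable sort over all keys: preferred ids (in first-occurrence
--     # order) get rank (0, position), everything else (1, int(key)).
--     idx = {}
--     for p in preferred_ids:
--         if p in entries and p not in idx:
--             idx[p] = len(idx)
--     order = sorted(entries, key=lambda k: (0, idx[k]) if k in idx else (1, int(k)))
--     return {k: entries[k] for k in order}
-- ===== Notes on version B (the rewrite author's own statement) =====
-- stated objective: alternative
-- what changed: Replaces A's two insertion phases (preferred loop with a seen set, then add-rest loop over a full sort) by one composite stable sort of all keys with rank (0, preferred-position) or (1, int(key)), then a single dict comprehension.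
import Mathlib
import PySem

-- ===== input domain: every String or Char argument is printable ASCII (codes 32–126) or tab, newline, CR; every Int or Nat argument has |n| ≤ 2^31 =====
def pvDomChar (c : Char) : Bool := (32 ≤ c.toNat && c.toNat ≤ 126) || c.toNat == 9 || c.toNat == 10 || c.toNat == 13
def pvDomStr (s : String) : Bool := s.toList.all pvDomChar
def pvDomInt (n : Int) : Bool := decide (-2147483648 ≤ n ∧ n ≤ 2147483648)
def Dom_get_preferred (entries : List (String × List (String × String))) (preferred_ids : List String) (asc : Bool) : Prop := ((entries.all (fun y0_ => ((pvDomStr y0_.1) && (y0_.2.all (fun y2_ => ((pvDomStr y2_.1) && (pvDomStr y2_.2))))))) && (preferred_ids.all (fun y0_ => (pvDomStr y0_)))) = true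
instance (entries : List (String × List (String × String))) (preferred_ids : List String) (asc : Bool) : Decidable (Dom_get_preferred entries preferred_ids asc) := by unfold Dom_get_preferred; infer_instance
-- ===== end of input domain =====

-- B orders the keys by ONE composite stable sort (preferred rank, int value) instead of A's two
-- insertion phases; same result, same asymptotic cost ("alternative").

-- ===== PORT A =====
def get_preferred (entries : List (String × List (String × String))) (preferred_ids : List String) (asc : Bool) : List (String × List (String × String)) :=
  let d : PySem.Dict String (List (String × String)) := PySem.Dict.ofList entries
  -- seen = set(); ordered = {}; for lvl_id in preferred_ids: ...
  let st1 : PySem.Set String × PySem.Dict String (List (String × String)) :=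
    preferred_ids.foldl (fun st lvl_id =>
      if d.contains lvl_id && !(PySem.Set.contains st.1 lvl_id) then
        (PySem.Set.add st.1 lvl_id, st.2.insert lvl_id (d.getD lvl_id []))
      else st) (PySem.Set.empty, PySem.Dict.empty)
  -- for lvl_id in sorted(entries.keys(), key=lambda x: int(x)): ...   (int(x) total under Pre_)
  let st2 : PySem.Set String × PySem.Dict String (List (String × String)) :=
    (PySem.List.sorted d.keys (fun x => (PySem.Int.ofStr? x).getD 0)).foldl (fun st lvl_id =>
      if !(PySem.Set.contains st.1 lvl_id) then
        (PySem.Set.add st.1 lvl_id, st.2.insert lvl_id (d.getD lvl_id []))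
      else st) st1
  st2.2.items

-- ===== PORT B =====
def get_preferred_alt (entries : List (String × List (String × String))) (preferred_ids : List String) (asc : Bool) : List (String × List (String × String)) :=
  let d : PySem.Dict String (List (String × String)) := PySem.Dict.ofList entries
  -- idx = {}; for p in preferred_ids: if p in entries and p not in idx: idx[p] = len(idx)
  let idx : PySem.Dict String Int :=
    preferred_ids.foldl (fun idx p =>
      if d.contains p && !(idx.contains p) then idx.insert p (idx.size : Int) else idx)
      PySem.Dict.empty
  -- sorted(entries, key=lambda k: (0, idx[k]) if k in idx else (1, int(k)))   (int(k) total under Pre_)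
  let order : List String :=
    PySem.List.sorted2 d.keys
      (fun k => if idx.contains k then (0 : Int) else 1)
      (fun k => if idx.contains k then idx.getD k 0 else (PySem.Int.ofStr? k).getD 0)
  -- {k: entries[k] for k in order}
  order.map (fun k => (k, d.getD k []))

-- ===== PRECONDITION & SPEC =====
-- Pre_ excludes exactly the inputs on which Python A raises ValueError: some key of entries is
-- not int()-convertible (A's sort applies int() to every key).
def Pre_get_preferred (entries : List (String × List (String × String))) (preferred_ids : List String) (asc : Bool) : Prop :=
  ∀ p ∈ entries, (PySem.Int.ofStr? p.1).isSome = true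
instance (entries : List (String × List (String × String))) (preferred_ids : List String) (asc : Bool) : Decidable (Pre_get_preferred entries preferred_ids asc) := by unfold Pre_get_preferred; infer_instance

def pvWitness_get_preferred : (List (String × List (String × String))) × List String × Bool :=
  ([("2", [("name", "a")]), ("10", [])], ["10"], true)

def Spec_get_preferred (entries : List (String × List (String × String))) (preferred_ids : List String) (asc : Bool) (out : List (String × List (String × String))) : Prop := out = get_preferred_alt entries preferred_ids asc
instance (entries : List (String × List (String × String))) (preferred_ids : List String) (asc : Bool) (out : List (String × List (String × String))) : Decidable (Spec_get_preferred entries preferred_ids asc out) := by unfold Spec_get_preferred; infer_instance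

-- ===== CLAIM (what is proved, stated in full; the proofs are below) =====
def Claim_equal_get_preferred : Prop := ∀ (entries : List (String × List (String × String))) (preferred_ids : List String) (asc : Bool), Dom_get_preferred entries preferred_ids asc → Pre_get_preferred entries preferred_ids asc → Spec_get_preferred entries preferred_ids asc (get_preferred entries preferred_ids asc)

-- ===== LEMMAS AND PROOFS =====

-- insertBy facts ------------------------------------------------------------

theorem pv_insertBy_cons {α : Type} (before : α → α → Bool) (x y : α) (ys : List α) :
    PySem.List.insertBy before x (y :: ys)
      = if before x y then x :: y :: ys else y :: PySem.List.insertBy before x ys := rfl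

theorem pv_insertBy_all_before {α : Type} (before : α → α → Bool) (x : α) (zs : List α)
    (h : ∀ z ∈ zs, before x z = true) :
    PySem.List.insertBy before x zs = x :: zs := by
  cases zs with
  | nil => rfl
  | cons z zs => rw [pv_insertBy_cons, if_pos (h z (by simp))]

theorem pv_insertBy_append_left {α : Type} (before : α → α → Bool) (x : α) (A B : List α)
    (h : ∀ a ∈ A, before x a = false) :
    PySem.List.insertBy before x (A ++ B) = A ++ PySem.List.insertBy before x B := by
  induction A with
  | nil => simp
  | cons a A ih =>
    rw [List.cons_append, pv_insertBy_cons, if_neg (by simp [h a (by simp)]),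
      ih (fun a ha => h a (by simp [ha])), List.cons_append]

theorem pv_insertBy_append_right {α : Type} (before : α → α → Bool) (x : α) (A B : List α)
    (h : ∀ b ∈ B, before x b = true) :
    PySem.List.insertBy before x (A ++ B) = PySem.List.insertBy before x A ++ B := by
  induction A with
  | nil => simpa using pv_insertBy_all_before before x B h
  | cons a A ih =>
    by_cases hb : before x a = true
    · rw [List.cons_append, pv_insertBy_cons, if_pos hb, pv_insertBy_cons, if_pos hb]
      simp
    · rw [List.cons_append, pv_insertBy_cons, if_neg hb, pv_insertBy_cons, if_neg hb, ih,
        List.cons_append]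

theorem pv_insertBy_congr {α : Type} (before before' : α → α → Bool) (x : α) (ys : List α)
    (h : ∀ y ∈ ys, before x y = before' x y) :
    PySem.List.insertBy before x ys = PySem.List.insertBy before' x ys := by
  induction ys with
  | nil => rfl
  | cons y ys ih =>
    rw [pv_insertBy_cons, pv_insertBy_cons, h y (by simp),
      ih (fun y hy => h y (by simp [hy]))]

-- filter commutes with a stable insertion into a sorted list ----------------

theorem pv_filter_insertBy {α : Type} (key : α → Int) (p : α → Bool) (x : α) (ys : List α)
    (hs : ys.Pairwise (fun a b => key a ≤ key b)) :
    (PySem.List.insertBy (fun a b => decide (key a < key b)) x ys).filter p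
      = if p x then PySem.List.insertBy (fun a b => decide (key a < key b)) x (ys.filter p)
        else ys.filter p := by
  induction ys with
  | nil => cases hpx : p x <;> simp [PySem.List.insertBy, hpx]
  | cons y ys ih =>
    rcases List.pairwise_cons.mp hs with ⟨hy, hys⟩
    by_cases hlt : key x < key y
    · have hall : ∀ z ∈ y :: ys, decide (key x < key z) = true := by
        intro z hz
        rcases List.mem_cons.mp hz with rfl | hz
        · simpa using hlt
        · simpa using lt_of_lt_of_le hlt (hy z hz)
      rw [pv_insertBy_all_before _ _ _ hall]
      cases hpx : p x
      · simp [hpx]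
      · have hall' : ∀ z ∈ (y :: ys).filter p, decide (key x < key z) = true :=
          fun z hz => hall z (List.mem_of_mem_filter hz)
        rw [pv_insertBy_all_before _ _ _ hall']
        simp [hpx]
    · have hb : decide (key x < key y) = false := by simpa using hlt
      rw [pv_insertBy_cons, if_neg (by simp [hb])]
      cases hpy : p y
      · simpa [List.filter, hpy] using ih hys
      · cases hpx : p x
        · simpa [List.filter, hpy, hpx] using ih hys
        · have := ih hys
          simp only [hpx, if_pos] at this
          simp [List.filter, hpy, hpx, this, pv_insertBy_cons, hb]

theorem pv_sorted_append {α : Type} (key : α → Int) (L : List α) (x : α) :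
    PySem.List.sorted (L ++ [x]) key
      = PySem.List.insertBy (fun a b => decide (key a < key b)) x (PySem.List.sorted L key) := by
  rw [PySem.List.sorted_eq_foldl_insertBy, PySem.List.sorted_eq_foldl_insertBy, List.foldl_append]
  rfl

theorem pv_sorted_filter {α : Type} (key : α → Int) (p : α → Bool) (L : List α) :
    (PySem.List.sorted L key).filter p = PySem.List.sorted (L.filter p) key := by
  induction L using List.reverseRecOn with
  | nil => rfl
  | append_singleton L x ih =>
    rw [pv_sorted_append, pv_filter_insertBy key p x _ (PySem.List.sorted_pairwise L key),
      List.filter_append]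
    cases hpx : p x
    · simp [hpx, ih, List.filter_singleton]
    · simp [hpx, ih, List.filter_singleton, pv_sorted_append]

theorem pv_sorted_key_congr {α : Type} (key key' : α → Int) (L : List α)
    (h : ∀ x ∈ L, key x = key' x) :
    PySem.List.sorted L key = PySem.List.sorted L key' := by
  induction L using List.reverseRecOn with
  | nil => rfl
  | append_singleton L x ih =>
    rw [pv_sorted_append, pv_sorted_append, ih (fun y hy => h y (by simp [hy]))]
    exact pv_insertBy_congr _ _ _ _ (fun y hy => by
      have hyL : y ∈ L := by
        have := (PySem.List.mem_sorted L key' false y).mp hy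
        simpa using this
      rw [h x (by simp), h y (by simp [hyL])])

-- the composite sort splits into the two phases -----------------------------

theorem pv_sorted2_append {α : Type} (k1 k2 : α → Int) (L : List α) (x : α) :
    PySem.List.sorted2 (L ++ [x]) k1 k2
      = PySem.List.insertBy
          (fun a b => decide (k1 a < k1 b) || (!decide (k1 b < k1 a) && decide (k2 a < k2 b)))
          x (PySem.List.sorted2 L k1 k2) := by
  show List.foldl _ [] (L ++ [x]) = _
  rw [List.foldl_append]
  rfl

theorem pv_sorted2_split {α : Type} (t : α → Bool) (k2 : α → Int) (L : List α) :
    PySem.List.sorted2 L (fun x => if t x then (0 : Int) else 1) k2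
      = PySem.List.sorted (L.filter t) k2
        ++ PySem.List.sorted (L.filter (fun x => !t x)) k2 := by
  induction L using List.reverseRecOn with
  | nil => rfl
  | append_singleton L x ih =>
    rw [pv_sorted2_append, ih, List.filter_append, List.filter_append]
    cases htx : t x
    · -- tag 1: skips the whole first block, stable insert into the second
      rw [pv_insertBy_append_left _ x _ _ (fun a ha => by
        have hta : t a = true := by
          have := (PySem.List.mem_sorted _ _ false a).mp ha
          simpa using (List.mem_filter.mp this).2
        simp [htx, hta])]
      rw [pv_insertBy_congr _ (fun a b => decide (k2 a < k2 b)) x _ (fun b hb => by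
        have htb : (!t b) = true := by
          have := (PySem.List.mem_sorted _ _ false b).mp hb
          simpa using (List.mem_filter.mp this).2
        simp [htx, Bool.eq_false_iff.mp (by simpa using htb)] )]
      simp [List.filter_cons, htx, pv_sorted_append]
    · -- tag 0: inserted before the whole second block, stable insert into the first
      rw [pv_insertBy_append_right _ x _ _ (fun b hb => by
        have htb : (!t b) = true := by
          have := (PySem.List.mem_sorted _ _ false b).mp hb
          simpa using (List.mem_filter.mp this).2
        simp [htx, Bool.eq_false_iff.mp (by simpa using htb)])]
      rw [pv_insertBy_congr _ (fun a b => decide (k2 a < k2 b)) x _ (fun a ha => by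
        have hta : t a = true := by
          have := (PySem.List.mem_sorted _ _ false a).mp ha
          simpa using (List.mem_filter.mp this).2
        simp [htx, hta])]
      simp [List.filter_cons, htx, pv_sorted_append]

-- the two phase-1 loops -----------------------------------------------------

def pvF (d : PySem.Dict String (List (String × String))) (k : String) :
    String × List (String × String) := (k, d.getD k [])

def pvStepS (d : PySem.Dict String (List (String × String))) (s : PySem.Set String)
    (p : String) : PySem.Set String :=
  if d.contains p && !(PySem.Set.contains s p) then PySem.Set.add s p else s

theorem pv_set_contains_iff (s : List String) (k : String) :
    PySem.Set.contains s k = true ↔ k ∈ s := by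
  simp [PySem.Set.contains]

theorem pv_set_contains_false (s : List String) (k : String) (h : k ∉ s) :
    PySem.Set.contains s k = false := by
  rw [← Bool.not_eq_true]
  intro hc
  exact h ((pv_set_contains_iff s k).mp hc)

theorem pv_mkmap_contains (d : PySem.Dict String (List (String × String))) (s : List String)
    (k : String) :
    (PySem.Dict.mk (s.map (pvF d))).contains k = PySem.Set.contains s k := by
  by_cases hk : k ∈ s
  · rw [(pv_set_contains_iff s k).mpr hk]
    rw [PySem.Dict.contains_iff_mem_keys]
    simp [PySem.Dict.keys, pvF, hk]
  · rw [pv_set_contains_false s k hk, ← Bool.not_eq_true]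
    intro hc
    have := (PySem.Dict.contains_iff_mem_keys _ k).mp hc
    simp [PySem.Dict.keys, pvF] at this
    exact hk this

theorem pv_loopA1 (d : PySem.Dict String (List (String × String))) (pids : List String) :
    ∀ s : PySem.Set String,
    pids.foldl (fun st lvl_id =>
        if d.contains lvl_id && !(PySem.Set.contains st.1 lvl_id) then
          (PySem.Set.add st.1 lvl_id, st.2.insert lvl_id (d.getD lvl_id []))
        else st)
      (s, PySem.Dict.mk (s.map (pvF d)))
      = (pids.foldl (pvStepS d) s, PySem.Dict.mk ((pids.foldl (pvStepS d) s).map (pvF d))) := by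
  induction pids with
  | nil => intro s; rfl
  | cons p pids ih =>
    intro s
    simp only [List.foldl_cons]
    by_cases hg : (d.contains p && !(PySem.Set.contains s p)) = true
    · have hns : PySem.Set.contains s p = false := by
        cases hh : PySem.Set.contains s p
        · rfl
        · simp [hh] at hg
          exact absurd ((pv_set_contains_iff s p).mp hh) hg.2
      have hnp2 : p ∉ s := fun hp => by
        rw [(pv_set_contains_iff s p).mpr hp] at hns; cases hns
      have hins : (PySem.Dict.mk (s.map (pvF d))).insert p (d.getD p [])
          = PySem.Dict.mk ((PySem.Set.add s p).map (pvF d)) := by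
        have hc : (PySem.Dict.mk (s.map (pvF d))).contains p = false := by
          rw [pv_mkmap_contains]; exact hns
        apply PySem.Dict.ext
        rw [PySem.Dict.items_insert_of_not_contains _ _ hc]
        simp [pvF, PySem.Set.add, hns, hnp2]
      have hstep : pvStepS d s p = PySem.Set.add s p := by rw [pvStepS, if_pos hg]
      rw [if_pos hg, hstep, hins]
      exact ih (PySem.Set.add s p)
    · have hstep : pvStepS d s p = s := by rw [pvStepS, if_neg hg]
      rw [if_neg hg, hstep]
      exact ih s

theorem pv_loopB1 (d : PySem.Dict String (List (String × String))) (pids : List String) :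
    ∀ (s : PySem.Set String) (idx : PySem.Dict String Int),
    idx.keys = s →
    s.Pairwise (fun a b => idx.getD a 0 < idx.getD b 0) →
    (∀ k ∈ s, idx.getD k 0 < (idx.size : Int)) →
    (pids.foldl (fun idx p =>
        if d.contains p && !(idx.contains p) then idx.insert p (idx.size : Int) else idx) idx).keys
        = pids.foldl (pvStepS d) s ∧
    (pids.foldl (pvStepS d) s).Pairwise (fun a b =>
        (pids.foldl (fun idx p =>
          if d.contains p && !(idx.contains p) then idx.insert p (idx.size : Int) else idx) idx).getD a 0
        < (pids.foldl (fun idx p =>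
          if d.contains p && !(idx.contains p) then idx.insert p (idx.size : Int) else idx) idx).getD b 0) ∧
    (∀ k ∈ pids.foldl (pvStepS d) s,
        (pids.foldl (fun idx p =>
          if d.contains p && !(idx.contains p) then idx.insert p (idx.size : Int) else idx) idx).getD k 0
        < ((pids.foldl (fun idx p =>
          if d.contains p && !(idx.contains p) then idx.insert p (idx.size : Int) else idx) idx).size : Int)) := by
  induction pids with
  | nil => intro s idx h1 h2 h3; exact ⟨h1, h2, h3⟩
  | cons p pids ih =>
    intro s idx h1 h2 h3
    have hcs : idx.contains p = PySem.Set.contains s p := by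
      by_cases hp : p ∈ s
      · rw [(PySem.Dict.contains_iff_mem_keys idx p).mpr (h1 ▸ hp),
          (pv_set_contains_iff s p).mpr hp]
      · have : idx.contains p = false := by
          rw [← Bool.not_eq_true]
          intro hc
          exact hp (h1 ▸ (PySem.Dict.contains_iff_mem_keys idx p).mp hc)
        rw [this, pv_set_contains_false s p hp]
    simp only [List.foldl_cons, hcs]
    by_cases hg : (d.contains p && !(PySem.Set.contains s p)) = true
    · have hns : PySem.Set.contains s p = false := by
        cases hh : PySem.Set.contains s p
        · rfl
        · simp [hh] at hg
          exact absurd ((pv_set_contains_iff s p).mp hh) hg.2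
      have hnp : p ∉ s := fun hp => by rw [(pv_set_contains_iff s p).mpr hp] at hns; cases hns
      have hnc : idx.contains p = false := by rw [hcs]; exact hns
      have hadd : PySem.Set.add s p = s ++ [p] := by simp [PySem.Set.add, hns, hnp]
      have hstep : pvStepS d s p = s ++ [p] := by rw [pvStepS, if_pos hg, hadd]
      rw [if_pos hg, hstep]
      apply ih (s ++ [p]) (idx.insert p (idx.size : Int))
      · rw [PySem.Dict.keys_insert_of_not_contains _ _ hnc, h1]
      · rw [List.pairwise_append]
        refine ⟨h2.imp_of_mem (fun {a b} ha hb hab => ?_), by simp, ?_⟩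
        · rw [PySem.Dict.getD_insert_of_ne _ _ _ (fun h => hnp (by rw [← h]; exact ha)),
            PySem.Dict.getD_insert_of_ne _ _ _ (fun h => hnp (by rw [← h]; exact hb))]
          exact hab
        · intro a ha b hb
          simp only [List.mem_singleton] at hb
          subst hb
          rw [PySem.Dict.getD_insert_of_ne _ _ _ (fun h => hnp (by rw [← h]; exact ha)),
            PySem.Dict.getD_insert_self]
          exact h3 a ha
      · intro k hk
        have hsize : ((idx.insert p (idx.size : Int)).size : Int) = (idx.size : Int) + 1 := by
          rw [PySem.Dict.size_insert]
          simp [hnc]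
        rcases List.mem_append.mp hk with hk | hk
        · rw [PySem.Dict.getD_insert_of_ne _ _ _ (fun h => hnp (by rw [← h]; exact hk)), hsize]
          exact lt_trans (h3 k hk) (by omega)
        · simp only [List.mem_singleton] at hk
          subst hk
          rw [PySem.Dict.getD_insert_self, hsize]
          omega
    · have hstep : pvStepS d s p = s := by rw [pvStepS, if_neg hg]
      rw [if_neg hg, hstep]
      exact ih s idx h1 h2 h3

theorem pv_stepS_eq (d : PySem.Dict String (List (String × String))) (s : PySem.Set String)
    (p : String) : pvStepS d s p = if d.contains p then PySem.Set.add s p else s := by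
  unfold pvStepS
  cases hs : PySem.Set.contains s p
  · simp [hs]
  · have hadd : PySem.Set.add s p = s := by
      show (if PySem.Set.contains s p = true then s else s ++ [p]) = s
      rw [if_pos hs]
    cases hd : d.contains p <;> simp [hd, hs, hadd]

theorem pv_S_eq_ofList (d : PySem.Dict String (List (String × String))) (pids : List String) :
    pids.foldl (pvStepS d) [] = PySem.Set.ofList (pids.filter (fun p => d.contains p)) := by
  have h : pids.foldl (pvStepS d) []
      = pids.foldl (fun s p => if d.contains p then PySem.Set.add s p else s) [] := by
    apply PySem.List.foldl_congr_mem
    intro acc x _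
    exact pv_stepS_eq d acc x
  rw [h, PySem.List.foldl_if_eq_foldl_filter]
  rfl

-- phase-2 loop of A ---------------------------------------------------------

theorem pv_loopA2 (d : PySem.Dict String (List (String × String))) (xs : List String)
    (hnd : xs.Nodup) :
    ∀ s : PySem.Set String,
    xs.foldl (fun st lvl_id =>
        if !(PySem.Set.contains st.1 lvl_id) then
          (PySem.Set.add st.1 lvl_id, st.2.insert lvl_id (d.getD lvl_id []))
        else st)
      (s, PySem.Dict.mk (s.map (pvF d)))
      = (s ++ xs.filter (fun k => !(PySem.Set.contains s k)),
         PySem.Dict.mk ((s ++ xs.filter (fun k => !(PySem.Set.contains s k))).map (pvF d))) := by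
  induction xs with
  | nil => intro s; simp
  | cons x xs ih =>
    rcases List.nodup_cons.mp hnd with ⟨hx, hnd'⟩
    intro s
    simp only [List.foldl_cons]
    by_cases hc : PySem.Set.contains s x = true
    · simp only [hc, Bool.not_true, Bool.false_eq_true, if_false]
      rw [ih hnd' s]
      simp [List.filter_cons, hc, (pv_set_contains_iff s x).mp hc]
    · have hcf : PySem.Set.contains s x = false := by simpa using hc
      have hxs : x ∉ s := fun hp => by
        rw [(pv_set_contains_iff s x).mpr hp] at hcf; cases hcf
      have hadd : PySem.Set.add s x = s ++ [x] := by simp [PySem.Set.add, hcf, hxs]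
      have hins : (PySem.Dict.mk (s.map (pvF d))).insert x (d.getD x [])
          = PySem.Dict.mk ((s ++ [x]).map (pvF d)) := by
        have hcd : (PySem.Dict.mk (s.map (pvF d))).contains x = false := by
          rw [pv_mkmap_contains]; exact hcf
        apply PySem.Dict.ext
        rw [PySem.Dict.items_insert_of_not_contains _ _ hcd]
        simp [pvF]
      have hgt : (!(PySem.Set.contains s x)) = true := by rw [hcf]; rfl
      rw [if_pos hgt, hadd, hins, ih hnd' (s ++ [x])]
      have hfilt : xs.filter (fun k => !(PySem.Set.contains (s ++ [x]) k))
          = xs.filter (fun k => !(PySem.Set.contains s k)) := by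
        apply List.filter_congr
        intro k hk
        have hkx : ¬(k = x) := fun h => hx (h ▸ hk)
        simp [PySem.Set.contains, List.contains_eq_any_beq, hkx]
      rw [hfilt]
      simp [List.filter_cons, hcf, hxs, List.append_assoc]

-- ===== VERDICT helper: the main equality =====

theorem pv_main (entries : List (String × List (String × String)))
    (preferred_ids : List String) (asc : Bool) :
    get_preferred entries preferred_ids asc = get_preferred_alt entries preferred_ids asc := by
  simp only [get_preferred, get_preferred_alt]
  set d : PySem.Dict String (List (String × String)) := PySem.Dict.ofList entries with hd
  set S : PySem.Set String := preferred_ids.foldl (pvStepS d) [] with hS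
  set idx : PySem.Dict String Int :=
    preferred_ids.foldl (fun idx p =>
      if d.contains p && !(idx.contains p) then idx.insert p (idx.size : Int) else idx)
      PySem.Dict.empty with hidx
  -- column names
  have hLnd : d.keys.Nodup := PySem.Dict.nodup_keys_ofList entries
  -- phase 1 of A
  have hA1 : preferred_ids.foldl (fun st lvl_id =>
      if d.contains lvl_id && !(PySem.Set.contains st.1 lvl_id) then
        (PySem.Set.add st.1 lvl_id, st.2.insert lvl_id (d.getD lvl_id []))
      else st) (PySem.Set.empty, PySem.Dict.empty)
      = (S, PySem.Dict.mk (S.map (pvF d))) := by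
    have := pv_loopA1 d preferred_ids ([] : PySem.Set String)
    simpa [hS] using this
  -- idx invariant
  have hB1 := pv_loopB1 d preferred_ids ([] : PySem.Set String) PySem.Dict.empty
    (by simp [PySem.Dict.keys, PySem.Dict.empty]) (by simp) (by simp)
  rcases hB1 with ⟨hkeys, hpair, _⟩
  rw [← hS] at hkeys hpair
  rw [← hidx] at hkeys hpair
  -- S facts
  have hSnd : S.Nodup := by
    rw [hS, pv_S_eq_ofList]
    exact PySem.Set.nodup_ofList _
  have hmemS : ∀ k, k ∈ S ↔ (k ∈ preferred_ids ∧ d.contains k = true) := by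
    intro k
    rw [hS, pv_S_eq_ofList, PySem.Set.mem_ofList, List.mem_filter]
  have hcontS : ∀ k, idx.contains k = PySem.Set.contains S k := by
    intro k
    by_cases hk : k ∈ S
    · rw [(PySem.Dict.contains_iff_mem_keys idx k).mpr (hkeys ▸ hk),
        (pv_set_contains_iff S k).mpr hk]
    · have h1 : idx.contains k = false := by
        rw [← Bool.not_eq_true]
        intro hc
        exact hk (hkeys ▸ (PySem.Dict.contains_iff_mem_keys idx k).mp hc)
      rw [h1, pv_set_contains_false S k hk]
  have hSsub : ∀ k ∈ S, k ∈ d.keys := by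
    intro k hk
    exact (PySem.Dict.contains_iff_mem_keys d k).mp ((hmemS k).mp hk).2
  -- phase 2 of A
  have hsortnd : (PySem.List.sorted d.keys (fun x => (PySem.Int.ofStr? x).getD 0)).Nodup :=
    (PySem.List.sorted_perm d.keys _ false).nodup_iff.mpr hLnd
  have hA2 := pv_loopA2 d (PySem.List.sorted d.keys (fun x => (PySem.Int.ofStr? x).getD 0))
    hsortnd S
  -- assemble A's items
  rw [hA1, hA2]
  -- B's sort splits
  have hsplit := pv_sorted2_split (fun k => idx.contains k)
    (fun k => if idx.contains k then idx.getD k 0 else (PySem.Int.ofStr? k).getD 0) d.keys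
  have hk1 : (fun k => if idx.contains k then (0 : Int) else 1)
      = (fun k => if (fun k => idx.contains k) k then (0 : Int) else 1) := rfl
  rw [hk1, hsplit]
  -- first block of B = S
  have hfirst : PySem.List.sorted (d.keys.filter (fun k => idx.contains k))
      (fun k => if idx.contains k then idx.getD k 0 else (PySem.Int.ofStr? k).getD 0) = S := by
    apply PySem.List.sorted_eq_of_perm_of_pairwise_lt
    · rw [List.perm_ext_iff_of_nodup hSnd (hLnd.filter _)]
      intro k
      rw [List.mem_filter]
      constructor
      · intro hk
        refine ⟨hSsub k hk, ?_⟩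
        rw [hcontS k]
        exact (pv_set_contains_iff S k).mpr hk
      · rintro ⟨_, hk⟩
        rw [hcontS k] at hk
        exact (pv_set_contains_iff S k).mp hk
    · refine hpair.imp_of_mem (fun {a b} ha hb hab => ?_)
      have hca : idx.contains a = true := by
        rw [hcontS a]; exact (pv_set_contains_iff S a).mpr ha
      have hcb : idx.contains b = true := by
        rw [hcontS b]; exact (pv_set_contains_iff S b).mpr hb
      simpa [hca, hcb] using hab
  -- second block of B = A's filtered sorted rest
  have hsecond : (PySem.List.sorted d.keys (fun x => (PySem.Int.ofStr? x).getD 0)).filter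
      (fun k => !(PySem.Set.contains S k))
      = PySem.List.sorted (d.keys.filter (fun k => !(idx.contains k)))
        (fun k => if idx.contains k then idx.getD k 0 else (PySem.Int.ofStr? k).getD 0) := by
    rw [pv_sorted_filter]
    have hfeq : d.keys.filter (fun k => !(PySem.Set.contains S k))
        = d.keys.filter (fun k => !(idx.contains k)) := by
      apply List.filter_congr
      intro k _
      rw [hcontS k]
    rw [hfeq]
    apply pv_sorted_key_congr
    intro k hk
    have : idx.contains k = false := by
      have := (List.mem_filter.mp hk).2
      simpa using this
    simp [this]
  rw [hfirst, hsecond]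
  rfl

-- ===== VERDICT (by name: the statement is the Claim_ definition above) =====
theorem get_preferred_spec : Claim_equal_get_preferred := by
  intro entries preferred_ids asc _ _
  unfold Spec_get_preferred
  exact pv_main entries preferred_ids asc
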